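-- pv_equiv track=rewrite | github.com/dp304/enterscumm | tools/unpack.py | get_c64_disk_offset
-- ===== SOURCE A (Python) =====
-- def get_c64_disk_offset(track, sector):
--     sectors_per_track = [21, 19, 18, 17]
--     track_count =       [17,  7,  6,  4]
--
--     track = track - 1   # Track number on C64 disk starts at 1
--
--     group = 0
--     while track > 0:
--         n = min(track, track_count[group])
--         sector += n * sectors_per_track[group]
--         track -= n
--         group += 1
--
--     return 256 * sector
-- ===== SOURCE B (Python) =====
-- def get_c64_disk_offset(track, sector):
--     # cumulative byte-offset table: offsets[t] = sectors before 1-based track t+1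
--     flat = [21] * 17 + [19] * 7 + [18] * 6 + [17] * 4
--     offsets = [0]
--     for s in flat:
--         offsets.append(offsets[-1] + s)
--     return 256 * (sector + offsets[max(track - 1, 0)])
-- ===== Notes on version B (the rewrite author's own statement) =====
-- stated objective: simpler
-- what changed: Replaces the accumulating while loop over (sectors_per_track, track_count) groups with a precomputed cumulative sector-offset table of length 35 and a single lookup 256*(sector + offsets[max(track-1,0)]).
-- outside the precondition, e.g. on get_c64_disk_offset(36, 0): A raises IndexError, B raises IndexError
import Mathlib
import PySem

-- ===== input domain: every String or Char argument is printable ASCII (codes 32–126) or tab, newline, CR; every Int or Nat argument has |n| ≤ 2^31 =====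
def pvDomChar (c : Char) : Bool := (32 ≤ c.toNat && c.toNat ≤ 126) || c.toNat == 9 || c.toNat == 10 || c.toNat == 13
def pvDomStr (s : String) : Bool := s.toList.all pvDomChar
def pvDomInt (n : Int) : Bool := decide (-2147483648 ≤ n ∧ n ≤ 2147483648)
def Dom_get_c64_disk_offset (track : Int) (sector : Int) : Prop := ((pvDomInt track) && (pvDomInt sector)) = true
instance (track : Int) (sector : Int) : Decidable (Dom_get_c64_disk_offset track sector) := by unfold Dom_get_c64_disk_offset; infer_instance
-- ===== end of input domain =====

-- B replaces A's accumulating while loop with a precomputed cumulative sector-offset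
-- table and a single lookup (objective: simpler).

-- ===== PORT A =====
-- the while loop of A, walking the zipped (track_count, sectors_per_track) groups;
-- an empty list with track > 0 is Python's IndexError (excluded by Pre_)
def pvLoopA (groups : List (Int × Int)) (track sector : Int) : Int :=
  match groups with
  | [] => 256 * sector
  | (tc, spt) :: rest =>
      if track > 0 then
        pvLoopA rest (track - min track tc) (sector + min track tc * spt)
      else 256 * sector

def get_c64_disk_offset (track : Int) (sector : Int) : Int :=
  pvLoopA [(17, 21), (7, 19), (6, 18), (4, 17)] (track - 1) sector

-- ===== PORT B =====
def pvFlatB : List Int :=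
  List.replicate 17 21 ++ List.replicate 7 19 ++ List.replicate 6 18 ++ List.replicate 4 17

def pvOffsetsB : List Int :=
  pvFlatB.foldl (fun acc s => acc ++ [(acc.getLast?.getD 0) + s]) [0]

def get_c64_disk_offset_alt (track : Int) (sector : Int) : Int :=
  256 * (sector + (PySem.List.pyGet? pvOffsetsB (max (track - 1) 0)).getD 0)

-- ===== PRECONDITION & SPEC =====
-- Pre_ excludes track ≥ 36, on which A raises IndexError (track_count[4]).
def Pre_get_c64_disk_offset (track : Int) (sector : Int) : Prop := track ≤ 35
instance (track : Int) (sector : Int) : Decidable (Pre_get_c64_disk_offset track sector) := by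
  unfold Pre_get_c64_disk_offset; infer_instance

def pvWitness_get_c64_disk_offset : Int × Int := (18, 3)

def Spec_get_c64_disk_offset (track : Int) (sector : Int) (out : Int) : Prop :=
  out = get_c64_disk_offset_alt track sector
instance (track : Int) (sector : Int) (out : Int) : Decidable (Spec_get_c64_disk_offset track sector out) := by
  unfold Spec_get_c64_disk_offset; infer_instance

-- ===== CLAIM (what is proved, stated in full; the proofs are below) =====
def Claim_equal_get_c64_disk_offset : Prop := ∀ (track : Int) (sector : Int), Dom_get_c64_disk_offset track sector → Pre_get_c64_disk_offset track sector → Spec_get_c64_disk_offset track sector (get_c64_disk_offset track sector)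

-- ===== LEMMAS AND PROOFS =====
lemma pvOffsetsB_eval : pvOffsetsB =
    [0, 21, 42, 63, 84, 105, 126, 147, 168, 189, 210, 231, 252, 273, 294, 315, 336,
     357, 376, 395, 414, 433, 452, 471, 490, 508, 526, 544, 562, 580, 598, 615, 632,
     649, 666] := by decide

-- ===== VERDICT (by name: the statement is the Claim_ definition above) =====
theorem get_c64_disk_offset_spec : Claim_equal_get_c64_disk_offset := by
  intro track sector _ hpre
  unfold Spec_get_c64_disk_offset get_c64_disk_offset get_c64_disk_offset_alt
  rw [pvOffsetsB_eval]
  unfold Pre_get_c64_disk_offset at hpre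
  by_cases h1 : track ≤ 1
  · have hmax : max (track - 1) 0 = 0 := by omega
    simp [pvLoopA, hmax, PySem.List.pyGet?, PySem.List.pyIdx?]
    omega
  · interval_cases track <;>
      simp [pvLoopA, PySem.List.pyGet?, PySem.List.pyIdx?] <;> ring
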